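-- pv_equiv track=rewrite | github.com/spenpal/PythonistaChallenges | 2024/05/main.py | find_seats
-- ===== SOURCE A (Python) =====
-- def find_seats(seats: list[list[int]], n: int) -> int:
--     rows, cols = len(seats), len(seats[0])
--     if not (1 <= n <= cols):
--         return 0
--
--     groups = 0
--     for r in range(rows):
--         prev = -1
--         for c in range(cols):
--             if seats[r][c] == 1:
--                 groups += max(0, c - prev - n)
--                 prev = c
--         groups += max(0, cols - prev - n)
--     return groups
-- ===== SOURCE B (Python) =====
-- def find_seats(seats: list[list[int]], n: int) -> int:
--     rows, cols = len(seats), len(seats[0])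
--     if not (1 <= n <= cols):
--         return 0
--
--     total = 0
--     for row in seats:
--         for occupied, length in _runs([cell == 1 for cell in row[:cols]]):
--             if not occupied:
--                 total += max(0, length - n + 1)
--     return total
--
--
-- def _runs(bits):
--     """Maximal runs of equal adjacent values, as (value, run_length) pairs."""
--     runs = []
--     rest = bits
--     while rest:
--         b = rest[0]
--         k = 1
--         while k < len(rest) and rest[k] == b:
--             k += 1
--         runs.append((b, k))
--         rest = rest[k:]
--     return runs
-- ===== Notes on version B (the rewrite author's own statement) =====
-- stated objective: alternative
-- what changed: B materializes each row's maximal runs of equal cells (a hand-written groupby) and adds max(0, L - n + 1) per empty run, instead of A's online gap arithmetic from the previous occupied index.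
import Mathlib
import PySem

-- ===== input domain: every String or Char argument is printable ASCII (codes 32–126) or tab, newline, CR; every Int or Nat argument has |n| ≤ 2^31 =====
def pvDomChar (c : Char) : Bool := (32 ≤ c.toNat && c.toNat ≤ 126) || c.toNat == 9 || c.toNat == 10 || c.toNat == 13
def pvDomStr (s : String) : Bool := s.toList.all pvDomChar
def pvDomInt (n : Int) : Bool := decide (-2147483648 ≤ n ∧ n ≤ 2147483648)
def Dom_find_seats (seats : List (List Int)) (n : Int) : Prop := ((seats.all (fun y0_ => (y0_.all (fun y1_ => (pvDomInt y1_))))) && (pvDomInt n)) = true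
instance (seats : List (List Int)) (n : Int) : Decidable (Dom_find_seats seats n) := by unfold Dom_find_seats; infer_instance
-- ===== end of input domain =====

-- B groups each row into maximal runs of equal cells and sums max(0, L-n+1) per empty run,
-- instead of A's running previous-occupied-index gap arithmetic; objective: alternative (same cost).

-- ===== PORT A =====
-- inner loop over c plus the trailing gap addition of A, for one row
def innerA (n cols : Int) (row : List Int) (g : Int) : Int :=
  let st := (PySem.List.pyRange 0 cols 1).foldl
    (fun (st : Int × Int) c =>
      if PySem.List.pyGetD row c 0 == 1 then (st.1 + max 0 (c - st.2 - n), c) else st)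
    (g, -1)
  st.1 + max 0 (cols - st.2 - n)

def find_seats (seats : List (List Int)) (n : Int) : Int :=
  let rows : Int := PySem.List.len seats
  let cols : Int := PySem.List.len (PySem.List.pyGetD seats 0 [])
  if ¬(1 ≤ n ∧ n ≤ cols) then 0
  else
    (PySem.List.pyRange 0 rows 1).foldl
      (fun groups r => innerA n cols (PySem.List.pyGetD seats r []) groups) 0

-- ===== PORT B =====
-- _runs of Source B: maximal runs of equal adjacent values as (value, run_length) pairs
def runsB (bits : List Bool) : List (Bool × Int) :=
  match bits with
  | [] => []
  | b :: bs =>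
    (b, 1 + ((bs.takeWhile (fun y => y == b)).length : Int)) :: runsB (bs.dropWhile (fun y => y == b))
termination_by bits.length
decreasing_by
  have := List.length_dropWhile_le (fun y => y == b) bs
  simp only [List.length_cons]; omega

-- body of B's 'for row in seats' loop
def rowContrib (n cols : Int) (row : List Int) (total : Int) : Int :=
  (runsB ((PySem.List.slice row none (some cols)).map (fun cell => cell == 1))).foldl
    (fun t p => if !p.1 then t + max 0 (p.2 - n + 1) else t) total

def find_seats_alt (seats : List (List Int)) (n : Int) : Int :=
  let _rows : Int := PySem.List.len seats
  let cols : Int := PySem.List.len (PySem.List.pyGetD seats 0 [])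
  if ¬(1 ≤ n ∧ n ≤ cols) then 0
  else seats.foldl (fun total row => rowContrib n cols row total) 0

-- ===== PRECONDITION & SPEC =====
-- Pre_ excludes exactly the inputs on which Python A raises an IndexError: empty seats
-- (seats[0]), and — once the guard 1 <= n <= cols passes — a row shorter than cols.
def Pre_find_seats (seats : List (List Int)) (n : Int) : Prop :=
  seats ≠ [] ∧
    ((1 ≤ n ∧ n ≤ ((seats.headD []).length : Int)) →
      ∀ row ∈ seats, (seats.headD []).length ≤ row.length)
instance (seats : List (List Int)) (n : Int) : Decidable (Pre_find_seats seats n) := by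
  unfold Pre_find_seats; infer_instance

def pvWitness_find_seats : List (List Int) × Int := ([[1, 0], [0, 0]], 1)

def Spec_find_seats (seats : List (List Int)) (n : Int) (out : Int) : Prop := out = find_seats_alt seats n
instance (seats : List (List Int)) (n : Int) (out : Int) : Decidable (Spec_find_seats seats n out) := by unfold Spec_find_seats; infer_instance

-- ===== CLAIM (what is proved, stated in full; the proofs are below) =====
def Claim_equal_find_seats : Prop := ∀ (seats : List (List Int)) (n : Int), Dom_find_seats seats n → Pre_find_seats seats n → Spec_find_seats seats n (find_seats seats n)

-- ===== LEMMAS AND PROOFS =====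

-- the state machine equivalent to A's inner loop, over booleans (cell == 1), state (groups, gap)
def Mb (n : Int) (st : Int × Int) (b : Bool) : Int × Int :=
  if b then (st.1 + max 0 (st.2 + 1 - n), 0) else (st.1, st.2 + 1)

-- groups contributed by the rest of a row, given 'gap' empty cells immediately before
def fgap (n gap : Int) : List Bool → Int
  | [] => max 0 (gap + 1 - n)
  | b :: bs => if b then max 0 (gap + 1 - n) + fgap n 0 bs else fgap n (gap + 1) bs

theorem enumFold (n : Int) : ∀ (xs : List Int) (s g gap prev : Int), prev = s - 1 - gap →
    (PySem.List.enumerate xs s).foldl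
      (fun (st : Int × Int) p => if p.2 == 1 then (st.1 + max 0 (p.1 - st.2 - n), p.1) else st)
      (g, prev)
    = (((xs.map (fun x => x == 1)).foldl (Mb n) (g, gap)).1,
       s + xs.length - 1 - ((xs.map (fun x => x == 1)).foldl (Mb n) (g, gap)).2) := by
  intro xs
  induction xs with
  | nil =>
    intro s g gap prev hp
    simp [PySem.List.enumerate_nil, Prod.mk.injEq]
    omega
  | cons x xs ih =>
    intro s g gap prev hp
    rw [PySem.List.enumerate_cons]
    simp only [List.foldl_cons, List.map_cons, List.length_cons]
    cases hx : (x == 1) with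
    | true =>
      simp only [Mb, if_true]
      rw [show s - prev - n = gap + 1 - n from by omega]
      rw [ih (s + 1) (g + max 0 (gap + 1 - n)) 0 s (by omega)]
      simp [Prod.mk.injEq]
      omega
    | false =>
      simp only [Mb, Bool.false_eq_true, if_false]
      rw [ih (s + 1) g (gap + 1) prev (by omega)]
      simp [Prod.mk.injEq]
      omega

theorem mbFold (n : Int) : ∀ (bs : List Bool) (g gap : Int),
    (bs.foldl (Mb n) (g, gap)).1 + max 0 ((bs.foldl (Mb n) (g, gap)).2 + 1 - n)
      = g + fgap n gap bs := by
  intro bs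
  induction bs with
  | nil => intro g gap; simp [fgap]
  | cons b bs ih =>
    intro b' gap
    cases b with
    | true =>
      simp only [List.foldl_cons, Mb, fgap, if_true]
      rw [ih]; ring
    | false =>
      simp only [List.foldl_cons, Mb, fgap, Bool.false_eq_true, if_false]
      rw [ih]

theorem fgap_replicate_false (n : Int) : ∀ (k : Nat) (gap : Int) (rest : List Bool),
    fgap n gap (List.replicate k false ++ rest) = fgap n (gap + k) rest := by
  intro k
  induction k with
  | zero => intro gap rest; simp
  | succ k ih =>
    intro gap rest
    rw [List.replicate_succ, List.cons_append]
    simp only [fgap, Bool.false_eq_true, if_false]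
    rw [ih]
    congr 1
    push_cast; ring

theorem fgap_replicate_true (n : Int) (hn : 1 ≤ n) : ∀ (k : Nat) (rest : List Bool),
    fgap n 0 (List.replicate k true ++ rest) = fgap n 0 rest := by
  intro k
  induction k with
  | zero => intro rest; simp
  | succ k ih =>
    intro rest
    rw [List.replicate_succ, List.cons_append]
    simp only [fgap, if_true]
    rw [ih]
    omega

theorem fgap_not_false_head (n : Int) (hn : 1 ≤ n) (d : List Bool)
    (hd : d.head? ≠ some false) (gap : Int) :
    fgap n gap d = max 0 (gap + 1 - n) + fgap n 0 d := by
  cases d with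
  | nil => simp [fgap]; omega
  | cons b d' =>
    cases b with
    | true =>
      simp only [fgap, if_true]
      omega
    | false => simp at hd

theorem runs_sum (n : Int) (hn : 1 ≤ n) : ∀ (bs : List Bool) (t : Int),
    (runsB bs).foldl (fun t p => if !p.1 then t + max 0 (p.2 - n + 1) else t) t
      = t + fgap n 0 bs := by
  intro bs
  induction bs using runsB.induct with
  | case1 => intro t; simp [runsB, fgap]; omega
  | case2 b bs ih =>
    intro t
    rw [runsB]
    simp only [List.foldl_cons]
    rw [ih]
    have htk : bs.takeWhile (fun y => y == b) =
        List.replicate (bs.takeWhile (fun y => y == b)).length b := by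
      apply List.eq_replicate_of_mem
      intro x hx
      have := List.mem_takeWhile_imp hx
      simpa using this
    have hsplit : b :: bs =
        List.replicate ((bs.takeWhile (fun y => y == b)).length + 1) b
          ++ bs.dropWhile (fun y => y == b) := by
      rw [List.replicate_succ, List.cons_append, ← htk, List.takeWhile_append_dropWhile]
    cases b with
    | true =>
      rw [hsplit, fgap_replicate_true n hn]
      simp
    | false =>
      rw [hsplit, fgap_replicate_false n]
      have hd : (bs.dropWhile (fun y => y == false)).head? ≠ some false := by
        intro h
        have := List.head?_dropWhile_not (fun y => y == false) bs
        rw [h] at this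
        simp at this
      rw [fgap_not_false_head n hn _ hd
            (0 + (((bs.takeWhile (fun y => y == false)).length + 1 : Nat) : Int))]
      simp only [Bool.not_false, if_true]
      push_cast
      omega

theorem rowA (n cols : Int) (hcols : 0 ≤ cols)
    (row : List Int) (hlen : cols ≤ (row.length : Int)) (g : Int) :
    innerA n cols row g
      = g + fgap n 0 ((row.take cols.toNat).map (fun x => x == 1)) := by
  simp only [innerA]
  have hstep : ∀ (st : Int × Int), ∀ c ∈ PySem.List.pyRange 0 cols 1,
      (if PySem.List.pyGetD row c 0 == 1 then (st.1 + max 0 (c - st.2 - n), c) else st)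
        = (if PySem.List.pyGetD (row.take cols.toNat) c 0 == 1
            then (st.1 + max 0 (c - st.2 - n), c) else st) := by
    intro st c hc
    rw [PySem.List.mem_pyRange_one] at hc
    rw [PySem.List.pyGetD_eq_getElem row 0 hc.1 (by omega),
        PySem.List.pyGetD_eq_getElem (row.take cols.toNat) 0 hc.1 (by simp; omega),
        List.getElem_take]
  rw [PySem.List.foldl_congr_mem (PySem.List.pyRange 0 cols 1) _
      (fun (st : Int × Int) c => if PySem.List.pyGetD (row.take cols.toNat) c 0 == 1
        then (st.1 + max 0 (c - st.2 - n), c) else st) (g, -1) hstep]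
  set xs := row.take cols.toNat with hxsdef
  have hlen2 : PySem.List.len xs = cols := by
    rw [PySem.List.len_eq, hxsdef]; simp; omega
  rw [← hlen2]
  have hmap : (PySem.List.pyRange 0 (PySem.List.len xs)).foldl
      (fun (st : Int × Int) c => if PySem.List.pyGetD xs c 0 == 1
        then (st.1 + max 0 (c - st.2 - n), c) else st) (g, -1)
    = (PySem.List.enumerate xs).foldl
      (fun (st : Int × Int) p => if p.2 == 1
        then (st.1 + max 0 (p.1 - st.2 - n), p.1) else st) (g, -1) := by
    rw [PySem.List.enumerate_eq_map_pyRange xs 0, List.foldl_map]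
  rw [hmap, enumFold n xs 0 g 0 (-1) (by omega)]
  simp only [PySem.List.len_eq]
  have hm := mbFold n (xs.map (fun x => x == 1)) g 0
  omega

theorem pyGetD_zero_cons (s0 : List Int) (tl : List (List Int)) :
    PySem.List.pyGetD (s0 :: tl) 0 ([] : List Int) = s0 := by
  simp [PySem.List.pyGetD, PySem.List.pyGet?, PySem.List.pyIdx?]

-- ===== VERDICT (by name: the statement is the Claim_ definition above) =====
theorem find_seats_spec : Claim_equal_find_seats := by
  unfold Claim_equal_find_seats
  intro seats n _hdom hpre
  unfold Spec_find_seats find_seats find_seats_alt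
  obtain ⟨hne, hrows⟩ := hpre
  cases seats with
  | nil => exact absurd rfl hne
  | cons s0 tl =>
    simp only [pyGetD_zero_cons, PySem.List.len_eq, List.headD_cons] at hrows ⊢
    by_cases hg : 1 ≤ n ∧ n ≤ ((s0.length : Nat) : Int)
    · rw [if_neg (not_not_intro hg), if_neg (not_not_intro hg)]
      rw [show (((s0 :: tl).length : Nat) : Int) = PySem.List.len (s0 :: tl) from
        (PySem.List.len_eq _).symm]
      rw [PySem.List.foldl_pyRange_zero_pyGetD (s0 :: tl) []
        (fun groups row => innerA n (s0.length : Int) row groups) 0]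
      apply PySem.List.foldl_congr_mem
      intro acc row hrow
      have hlenr : s0.length ≤ row.length := hrows hg row hrow
      rw [rowA n (s0.length : Int) (Int.natCast_nonneg _) row (by exact_mod_cast hlenr) acc]
      unfold rowContrib
      rw [PySem.List.slice_to row (Int.natCast_nonneg _)]
      rw [runs_sum n hg.1]
    · simp [hg]
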